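-- pv_equiv track=rewrite | github.com/yoonus-k/Stock_AI_Predictor | TwitterAPI_Sentiment.py | preprocess
-- ===== SOURCE A (Python) =====
-- def preprocess(text):
--     """
--     Preprocess tweet text by handling mentions and links
--
--     Args:
--         text (str): The text to preprocess
--
--     Returns:
--         str: Preprocessed text
--     """
--     if not text or not isinstance(text, str):
--         return ""
--
--     new_text = []
--     for t in text.split(" "):
--         t = '@user' if t.startswith('@') and len(t) > 1 else t
--         t = 'http' if t.startswith('http') else t
--         new_text.append(t)
--     return " ".join(new_text)
-- ===== SOURCE B (Python) =====
-- def preprocess(text):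
--     """Single streaming pass over the characters instead of split/map/join."""
--     if not text or not isinstance(text, str):
--         return ""
--
--     def norm(tok):
--         if tok.startswith('@') and len(tok) > 1:
--             return '@user'
--         if tok.startswith('http'):
--             return 'http'
--         return tok
--
--     out = []
--     tok = []
--     for ch in text:
--         if ch == ' ':
--             out.append(norm(''.join(tok)))
--             out.append(' ')
--             tok = []
--         else:
--             tok.append(ch)
--     out.append(norm(''.join(tok)))
--     return ''.join(out)
-- ===== Notes on version B (the rewrite author's own statement) =====
-- stated objective: alternative
-- what changed: Replaces the split-on-space / per-token map / join pipeline by a single streaming character scan that flushes each space-delimited token through a small normalizer as it goes.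
import Mathlib
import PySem

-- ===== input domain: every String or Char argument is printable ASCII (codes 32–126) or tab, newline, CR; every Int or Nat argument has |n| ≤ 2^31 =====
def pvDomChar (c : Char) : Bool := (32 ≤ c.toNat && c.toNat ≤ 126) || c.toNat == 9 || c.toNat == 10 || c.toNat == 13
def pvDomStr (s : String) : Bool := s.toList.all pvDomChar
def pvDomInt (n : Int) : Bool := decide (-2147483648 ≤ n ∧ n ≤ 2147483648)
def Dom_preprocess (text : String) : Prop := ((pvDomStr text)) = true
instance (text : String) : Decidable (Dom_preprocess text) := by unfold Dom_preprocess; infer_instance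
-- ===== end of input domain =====

-- B replaces A's split(" ")/map/join pipeline by a single streaming character scan
-- that normalizes each space-delimited token as it is flushed (alternative, same cost).


-- ===== PORT A =====
-- Python's `" ".join(...)` is PySem.Chars.join on the char lists; the loop is a map
-- over text.split(" ") with the two conditional reassignments of t kept in order.
def preprocess (text : String) : String :=
  if text = "" then ""
  else
    String.ofList (PySem.Chars.join [' ']
      ((PySem.Chars.splitOn text.toList [' ']).map (fun t =>
        let t1 := if PySem.Chars.startswith t ['@'] && decide (1 < PySem.Chars.len t)
                  then "@user".toList else t
        if PySem.Chars.startswith t1 "http".toList then "http".toList else t1)))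

-- ===== PORT B =====
-- B's helper norm(tok): early-return chain.
def pvNorm (t : List Char) : List Char :=
  if PySem.Chars.startswith t ['@'] && decide (1 < PySem.Chars.len t) then "@user".toList
  else if PySem.Chars.startswith t "http".toList then "http".toList
  else t

-- B's for-loop over the characters: `tok` is the pending token, output built left to right.
def pvScan : List Char → List Char → List Char
  | [], tok => pvNorm tok
  | c :: rest, tok =>
    if c = ' ' then pvNorm tok ++ ' ' :: pvScan rest []
    else pvScan rest (tok ++ [c])

def preprocess_alt (text : String) : String :=
  if text = "" then "" else String.ofList (pvScan text.toList [])

-- ===== PRECONDITION & SPEC =====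
def Spec_preprocess (text : String) (out : String) : Prop := out = preprocess_alt text
instance (text : String) (out : String) : Decidable (Spec_preprocess text out) := by unfold Spec_preprocess; infer_instance

-- ===== CLAIM (what is proved, stated in full; the proofs are below) =====
def Claim_equal_preprocess : Prop := ∀ (text : String), Dom_preprocess text → Spec_preprocess text (preprocess text)

-- ===== LEMMAS AND PROOFS =====

/-- Right-recursive description of splitting on a single space. -/
def pvTokens : List Char → List (List Char)
  | [] => [[]]
  | c :: rest =>
    if c = ' ' then [] :: pvTokens rest
    else match pvTokens rest with
      | [] => [[c]]
      | t :: ts => (c :: t) :: ts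

/-- Prepend `p` to the first token (or make it the only token). -/
def pvConsHead (p : List Char) : List (List Char) → List (List Char)
  | [] => [p]
  | t :: ts => (p ++ t) :: ts

theorem pvTokens_ne_nil (l : List Char) : pvTokens l ≠ [] := by
  cases l with
  | nil => simp [pvTokens]
  | cons c rest =>
    simp only [pvTokens]
    split
    · simp
    · split <;> simp

theorem pv_go_spec : ∀ (fuel : Nat) (l cur : List Char) (acc : List (List Char)),
    l.length ≤ fuel →
    PySem.Chars.splitOn.go [' '] fuel l cur acc
      = acc.reverse ++ pvConsHead cur.reverse (pvTokens l) := by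
  intro fuel
  induction fuel with
  | zero =>
    intro l cur acc h
    have hl : l = [] := List.length_eq_zero_iff.mp (Nat.le_zero.mp h)
    subst hl
    simp [PySem.Chars.splitOn.go, pvTokens, pvConsHead]
  | succ n ih =>
    intro l cur acc h
    cases l with
    | nil => simp [PySem.Chars.splitOn.go, pvTokens, pvConsHead]
    | cons c rest =>
      by_cases hc : c = ' '
      · subst hc
        have : PySem.Chars.splitOn.go [' '] (n+1) (' ' :: rest) cur acc
            = PySem.Chars.splitOn.go [' '] n rest [] (cur.reverse :: acc) := by
          simp [PySem.Chars.splitOn.go, List.isPrefixOf]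
        rw [this, ih rest [] (cur.reverse :: acc) (by simpa using Nat.succ_le_succ_iff.mp h)]
        cases hts : pvTokens rest with
        | nil => exact absurd hts (pvTokens_ne_nil rest)
        | cons t ts => simp [pvTokens, pvConsHead, hts]
      · have : PySem.Chars.splitOn.go [' '] (n+1) (c :: rest) cur acc
            = PySem.Chars.splitOn.go [' '] n rest (c :: cur) acc := by
          have hc' : ¬ (' ' = c) := fun e => hc e.symm
          simp [PySem.Chars.splitOn.go, List.isPrefixOf, hc']
        rw [this, ih rest (c :: cur) acc (by simpa using Nat.succ_le_succ_iff.mp h)]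
        cases hts : pvTokens rest with
        | nil => exact absurd hts (pvTokens_ne_nil rest)
        | cons t ts => simp [pvTokens, pvConsHead, hts, hc]

theorem pvSplitOn_space (l : List Char) :
    PySem.Chars.splitOn l [' '] = pvTokens l := by
  have := pv_go_spec (l.length + 1) l [] [] (Nat.le_succ _)
  rw [PySem.Chars.splitOn, this]
  cases hts : pvTokens l with
  | nil => exact absurd hts (pvTokens_ne_nil l)
  | cons t ts => simp [pvConsHead]

theorem pvJoin_cons (a : List Char) (b : List Char) (ts : List (List Char)) :
    PySem.Chars.join [' '] (a :: b :: ts) = a ++ ' ' :: PySem.Chars.join [' '] (b :: ts) := by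
  simp [PySem.Chars.join, List.intercalate, List.intersperse]

theorem pvScan_spec : ∀ (l tok : List Char),
    pvScan l tok = PySem.Chars.join [' '] ((pvConsHead tok (pvTokens l)).map pvNorm) := by
  intro l
  induction l with
  | nil => intro tok; simp [pvScan, pvTokens, pvConsHead, PySem.Chars.join, List.intercalate]
  | cons c rest ih =>
    intro tok
    by_cases hc : c = ' '
    · subst hc
      cases hts : pvTokens rest with
      | nil => exact absurd hts (pvTokens_ne_nil rest)
      | cons t ts =>
        rw [pvScan, if_pos rfl, ih []]
        simp [pvTokens, pvConsHead, hts, pvJoin_cons]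
    · cases hts : pvTokens rest with
      | nil => exact absurd hts (pvTokens_ne_nil rest)
      | cons t ts =>
        rw [pvScan, if_neg hc, ih (tok ++ [c])]
        simp [pvTokens, hc, hts, pvConsHead]

theorem pvNorm_eq_transA (t : List Char) :
    (if PySem.Chars.startswith
          (if PySem.Chars.startswith t ['@'] && decide (1 < PySem.Chars.len t)
           then "@user".toList else t) "http".toList
     then "http".toList
     else if PySem.Chars.startswith t ['@'] && decide (1 < PySem.Chars.len t)
          then "@user".toList else t) = pvNorm t := by
  by_cases h : (PySem.Chars.startswith t ['@'] && decide (1 < PySem.Chars.len t)) = true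
  · have hu : PySem.Chars.startswith "@user".toList "http".toList = false := by decide
    rw [if_pos h, hu, if_neg (by simp), pvNorm, if_pos h]
  · rw [if_neg h, pvNorm, if_neg h]

-- ===== VERDICT (by name: the statement is the Claim_ definition above) =====
theorem preprocess_spec : Claim_equal_preprocess := by
  intro text _
  unfold Spec_preprocess preprocess preprocess_alt
  by_cases h : text = ""
  · simp [h]
  · rw [if_neg h, if_neg h]
    congr 1
    rw [pvScan_spec text.toList [], pvSplitOn_space]
    cases hts : pvTokens text.toList with
    | nil => exact absurd hts (pvTokens_ne_nil _)
    | cons t ts =>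
      simp only [pvConsHead, List.nil_append]
      congr 1
      exact List.map_congr_left (fun x _ => pvNorm_eq_transA x)
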